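-- pv_equiv track=rewrite | github.com/r-jelly/program-solving | baekjoon/11971.py | solution
-- ===== SOURCE A (Python) =====
-- from typing import List
--
-- def solution(road_limit: List[List[int]], user_ride: List[List[int]]):
--     # 항상 정확하게 100km의 경우만 들어오게 됨
--     # 모든 1km 마다 속도를 비교한다면, O(1)의 시간복잡도로 해결할 수 있음
--
--     speed_limit = [0] * 101
--     cumulate_length = 1
--     for length, speed in road_limit:
--         # 각 구간의 길이마다
--         for i in range(0, length):
--             # 현재까지 지나온 모든 구간의 길이 다음 칸부터 속도를 지정
--             speed_limit[i+cumulate_length] = speed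
--         # 현재까지 지나온 길이를 업데이트
--         cumulate_length += length
--
--     user_speed = [0] * 101
--     cumulate_length = 1
--     for length, speed in user_ride:
--         for i in range(0, length):
--             user_speed[i+cumulate_length] = speed
--         cumulate_length += length
--
--     max_over_speed = 0
--     for i in range(1, 101):
--         # 같은 인덱스에 존재하는 값끼리 비교했을 때, 최댓값을 구함
--         max_over_speed = max(
--             max_over_speed,
--             user_speed[i] - speed_limit[i]
--         )
--
--     return max_over_speed
-- ===== SOURCE B (Python) =====
-- def solution(road_limit, user_ride):
--     # B: no per-km arrays; compute the speed at km k on demand by scanning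
--     # the segment list with a running cumulative position, then max the diffs.
--     def speed_at(segments, k):
--         pos = 1
--         for length, speed in segments:
--             if pos <= k < pos + length:
--                 return speed
--             pos += length
--         return 0
--     diffs = [speed_at(user_ride, k) - speed_at(road_limit, k) for k in range(1, 101)]
--     return max(0, max(diffs))
-- ===== Notes on version B (the rewrite author's own statement) =====
-- stated objective: alternative
-- what changed: B drops A's two 101-slot per-km arrays and computes the speed at each km on demand by scanning the segment lists with a running cumulative position, then takes the max of the 100 differences.
-- outside the precondition, e.g. on solution([], [[-2, 0], [1, 50]]): A returns 50, B returns 0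
import Mathlib
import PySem

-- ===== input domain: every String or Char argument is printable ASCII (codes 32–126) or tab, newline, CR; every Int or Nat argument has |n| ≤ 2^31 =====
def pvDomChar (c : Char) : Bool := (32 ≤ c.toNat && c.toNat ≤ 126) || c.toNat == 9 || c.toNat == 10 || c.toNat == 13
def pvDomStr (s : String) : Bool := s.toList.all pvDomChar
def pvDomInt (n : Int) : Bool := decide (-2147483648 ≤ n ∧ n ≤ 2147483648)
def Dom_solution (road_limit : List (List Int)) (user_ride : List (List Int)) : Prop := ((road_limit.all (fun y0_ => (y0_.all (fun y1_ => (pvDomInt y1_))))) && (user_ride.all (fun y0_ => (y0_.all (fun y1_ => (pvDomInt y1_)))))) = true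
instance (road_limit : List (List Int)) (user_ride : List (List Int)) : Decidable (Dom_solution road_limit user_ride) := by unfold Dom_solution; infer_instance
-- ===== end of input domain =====

-- B replaces A's two expanded per-km arrays by on-demand segment scans (alternative decomposition, same results on Pre_).

-- ===== PORT A =====
-- one 'for length, speed in lst' segment step: fill the per-km array, advance the cumulative length
-- (a row that is not a 2-list makes Python raise ValueError — outside Pre_; the port leaves the state unchanged there)
def fillSeg (st : List Int × Int) (row : List Int) : List Int × Int :=
  match row with
  | [l, s] =>
    ((PySem.List.pyRange 0 l 1).foldl (fun a i => PySem.List.pySetD a (i + st.2) s) st.1, st.2 + l)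
  | _ => st

def solution (road_limit : List (List Int)) (user_ride : List (List Int)) : Int :=
  let speed_limit := (road_limit.foldl fillSeg (List.replicate 101 (0 : Int), 1)).1
  let user_speed := (user_ride.foldl fillSeg (List.replicate 101 (0 : Int), 1)).1
  (PySem.List.pyRange 1 101 1).foldl
    (fun m i => max m (PySem.List.pyGetD user_speed i 0 - PySem.List.pyGetD speed_limit i 0)) 0

-- ===== PORT B =====
-- speed_at's loop: running position pos, return the speed of the segment containing km k, else 0
-- (a row that is not a 2-list makes Python raise ValueError — outside Pre_; the port returns 0 there)
def speedGo (pos : Int) (segs : List (List Int)) (k : Int) : Int :=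
  match segs with
  | [] => 0
  | row :: rest =>
    match row with
    | [l, s] => if pos ≤ k ∧ k < pos + l then s else speedGo (pos + l) rest k
    | _ => 0

def solution_alt (road_limit : List (List Int)) (user_ride : List (List Int)) : Int :=
  let diffs := (PySem.List.pyRange 1 101 1).map
    (fun k => speedGo 1 user_ride k - speedGo 1 road_limit k)
  match diffs with
  | [] => 0
  | d :: ds => max 0 (ds.foldl max d)

-- ===== PRECONDITION & SPEC =====
-- validity scan over one segment list: every row is a [length, speed] pair and every positive-length
-- segment lies inside km 1..100 at or after the end (hi) of all earlier positive-length segments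
def okSegs : Int → Int → List (List Int) → Bool
  | _, _, [] => true
  | hi, cum, row :: rest =>
    match row with
    | [l, _] =>
      if 0 < l then
        decide (hi ≤ cum) && decide (cum + l ≤ 101) && okSegs (cum + l) (cum + l) rest
      else
        okSegs hi (cum + l) rest
    | _ => false

-- Pre_ restricts to the task's natural domain: every row is a [length, speed] pair and the positive-length
-- segments of each list cover disjoint km ranges inside km 1..100 in increasing order. Outside it A raises
-- ValueError (a row that is not a 2-list) or IndexError (a segment reaching past km 100), except that with
-- out-of-order or negatively-positioned segments A can still return a value through Python's negative-index
-- wraparound and last-write-wins overwriting — artefacts of the array expansion (see cites).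
def Pre_solution (road_limit : List (List Int)) (user_ride : List (List Int)) : Prop :=
  okSegs 0 1 road_limit = true ∧ okSegs 0 1 user_ride = true

instance (road_limit : List (List Int)) (user_ride : List (List Int)) : Decidable (Pre_solution road_limit user_ride) := by unfold Pre_solution; infer_instance

def pvWitness_solution : List (List Int) × List (List Int) :=
  ([[50, 60], [50, 40]], [[40, 70], [60, 30]])

def Spec_solution (road_limit : List (List Int)) (user_ride : List (List Int)) (out : Int) : Prop := out = solution_alt road_limit user_ride
instance (road_limit : List (List Int)) (user_ride : List (List Int)) (out : Int) : Decidable (Spec_solution road_limit user_ride out) := by unfold Spec_solution; infer_instance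

-- ===== CLAIM (what is proved, stated in full; the proofs are below) =====
def Claim_equal_solution : Prop := ∀ (road_limit : List (List Int)) (user_ride : List (List Int)), Dom_solution road_limit user_ride → Pre_solution road_limit user_ride → Spec_solution road_limit user_ride (solution road_limit user_ride)

-- ===== LEMMAS AND PROOFS =====\n\n-- getD after set, in one if (composite of List.getElem?_set)
lemma getD_set_if (l : List Int) (n m : Nat) (v d : Int) :
    (l.set n v).getD m d = if m = n ∧ n < l.length then v else l.getD m d := by
  simp only [List.getD_eq_getElem?_getD, List.getElem?_set]
  split_ifs <;> simp_all

-- the inner 'for i in range(0, length)' fill keeps the array length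
lemma inner_len (n : Nat) (arr : List Int) (cum s : Int) :
    ((PySem.List.pyRange 0 (n : Int) 1).foldl (fun a i => PySem.List.pySetD a (i + cum) s) arr).length
      = arr.length := by
  induction n generalizing arr with
  | zero => rw [show ((0 : Nat) : Int) = 0 from rfl, PySem.List.pyRange_one_eq_nil (by norm_num)]; rfl
  | succ m ih =>
      rw [show ((m + 1 : Nat) : Int) = (m : Int) + 1 by push_cast; ring,
        PySem.List.pyRange_one_succ_right (by positivity), List.foldl_append]
      simp only [List.foldl_cons, List.foldl_nil]
      rw [PySem.List.length_pySetD, ih]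

-- what the inner fill writes: s on [cum, cum+n), everything else untouched (nonnegative reads)
lemma inner_get (n : Nat) (arr : List Int) (cum s k : Int)
    (hcum : 0 ≤ cum) (hk : 0 ≤ k) (hlen : cum + (n : Int) ≤ (arr.length : Int)) :
    PySem.List.pyGetD ((PySem.List.pyRange 0 (n : Int) 1).foldl
        (fun a i => PySem.List.pySetD a (i + cum) s) arr) k 0
      = if cum ≤ k ∧ k < cum + n then s else PySem.List.pyGetD arr k 0 := by
  induction n generalizing arr with
  | zero =>
      rw [show ((0 : Nat) : Int) = 0 from rfl, PySem.List.pyRange_one_eq_nil (by norm_num)]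
      simp only [List.foldl_nil, add_zero]
      rw [if_neg (by omega)]
  | succ m ih =>
      rw [show ((m + 1 : Nat) : Int) = (m : Int) + 1 by push_cast; ring,
        PySem.List.pyRange_one_succ_right (by positivity), List.foldl_append]
      simp only [List.foldl_cons, List.foldl_nil]
      rw [PySem.List.pySetD_of_nonneg _ s (i := (m : Int) + cum) (by omega)]
      rw [PySem.List.pyGetD_of_nonneg _ _ hk, getD_set_if, inner_len]
      have hm1 : ((m + 1 : Nat) : Int) = (m : Int) + 1 := by push_cast; ring
      rw [hm1] at hlen
      by_cases hkm : k = (m : Int) + cum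
      · subst hkm
        rw [if_pos ⟨rfl, by omega⟩, if_pos ⟨by omega, by omega⟩]
      · rw [if_neg (fun hc => hkm (by omega))]
        rw [← PySem.List.pyGetD_of_nonneg _ _ hk, ih arr (by omega)]
        split_ifs with h1 h2 h2 <;> first | rfl | omega

-- which km a segment list covers, scanned the way speedGo scans
def covered : Int → List (List Int) → Int → Bool
  | _, [], _ => false
  | cum, row :: rest, k =>
    match row with
    | [l, _] => decide (cum ≤ k ∧ k < cum + l) || covered (cum + l) rest k
    | _ => false

-- under the ordering invariant, everything covered lies at or beyond hi
lemma covered_ge (lst : List (List Int)) : ∀ (hi cum k : Int),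
    okSegs hi cum lst = true → covered cum lst k = true → hi ≤ k := by
  induction lst with
  | nil => intro hi cum k _ hc; simp [covered] at hc
  | cons row rest ih =>
      intro hi cum k hok hc
      match row with
      | [l, s] =>
        simp only [okSegs] at hok
        simp only [covered, Bool.or_eq_true, decide_eq_true_eq] at hc
        by_cases hl : 0 < l
        · rw [if_pos hl] at hok
          simp only [Bool.and_eq_true, decide_eq_true_eq] at hok
          rcases hc with hc | hc
          · omega
          · have := ih (cum + l) (cum + l) k hok.2 hc; omega
        · rw [if_neg hl] at hok
          rcases hc with hc | hc
          · omega
          · exact ih hi (cum + l) k hok hc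
      | [] => simp [okSegs] at hok
      | [_] => simp [okSegs] at hok
      | _ :: _ :: _ :: _ => simp [okSegs] at hok

lemma speedGo_not_covered (lst : List (List Int)) : ∀ (cum k : Int),
    covered cum lst k = false → speedGo cum lst k = 0 := by
  induction lst with
  | nil => intro cum k _; rfl
  | cons row rest ih =>
      intro cum k hc
      match row with
      | [l, s] =>
        simp only [covered, Bool.or_eq_false_iff, decide_eq_false_iff_not] at hc
        simp only [speedGo]
        rw [if_neg hc.1]
        exact ih (cum + l) k hc.2
      | [] => rfl
      | [_] => rfl
      | _ :: _ :: _ :: _ => rfl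

-- the outer segment fold: at every km 0..100 the 101-slot array holds the scanned speed on the
-- covered kms and the old entry elsewhere
lemma fill_get (lst : List (List Int)) : ∀ (arr : List Int) (hi cum k : Int),
    okSegs hi cum lst = true → arr.length = 101 → 0 ≤ hi → 0 ≤ k → k ≤ 100 →
    PySem.List.pyGetD (lst.foldl fillSeg (arr, cum)).1 k 0
      = if covered cum lst k then speedGo cum lst k else PySem.List.pyGetD arr k 0 := by
  induction lst with
  | nil =>
      intro arr hi cum k _ _ _ _ _
      simp [covered]
  | cons row rest ih =>
      intro arr hi cum k hok harr hhi hk hk100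
      match row with
      | [l, s] =>
        simp only [okSegs] at hok
        simp only [List.foldl_cons, fillSeg, covered, speedGo]
        by_cases hl : 0 < l
        · rw [if_pos hl] at hok
          simp only [Bool.and_eq_true, decide_eq_true_eq] at hok
          obtain ⟨⟨hhc, hle⟩, hrest⟩ := hok
          have hcast : ((l.toNat : Nat) : Int) = l := by omega
          have hre : (PySem.List.pyRange 0 l 1).foldl
              (fun a i => PySem.List.pySetD a (i + cum) s) arr
              = (PySem.List.pyRange 0 ((l.toNat : Nat) : Int) 1).foldl
              (fun a i => PySem.List.pySetD a (i + cum) s) arr := by rw [hcast]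
          rw [hre, ih _ (cum + l) (cum + l) k hrest (by rw [inner_len]; exact harr)
            (by omega) hk hk100]
          rw [inner_get l.toNat arr cum s k (by omega) hk (by rw [harr]; push_cast; omega)]
          rw [hcast]
          by_cases hcov : covered (cum + l) rest k = true
          · have hge := covered_ge rest (cum + l) (cum + l) k hrest hcov
            have hnin : ¬(cum ≤ k ∧ k < cum + l) := by omega
            simp [hcov, hnin]
          · by_cases hin : cum ≤ k ∧ k < cum + l
            · simp [hcov, hin]
            · simp [hcov, hin]
        · rw [if_neg hl] at hok
          rw [PySem.List.pyRange_one_eq_nil (by omega)]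
          simp only [List.foldl_nil]
          rw [ih arr hi (cum + l) k hok harr hhi hk hk100]
          have hnin : ¬(cum ≤ k ∧ k < cum + l) := by omega
          simp [hnin]
      | [] => simp [okSegs] at hok
      | [_] => simp [okSegs] at hok
      | _ :: _ :: _ :: _ => simp [okSegs] at hok

-- top level: for km 1..100 the filled array reads back exactly speed_at
lemma fill_top (lst : List (List Int)) (k : Int)
    (hok : okSegs 0 1 lst = true) (hk : 1 ≤ k) (hk100 : k ≤ 100) :
    PySem.List.pyGetD (lst.foldl fillSeg (List.replicate 101 (0 : Int), 1)).1 k 0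
      = speedGo 1 lst k := by
  rw [fill_get lst _ 0 1 k hok (by simp) (by omega) (by omega) hk100]
  split_ifs with h
  · rfl
  · rw [speedGo_not_covered lst 1 k (by simpa using h)]
    rw [PySem.List.pyGetD_of_nonneg _ _ (by omega : (0 : Int) ≤ k)]
    rw [List.getD_eq_getElem?_getD, List.getElem?_replicate]
    split <;> rfl

lemma foldl_max_map (l : List Int) (f : Int → Int) (init : Int) :
    l.foldl (fun m i => max m (f i)) init = (l.map f).foldl max init := by
  induction l generalizing init with
  | nil => rfl
  | cons a t ih => simp only [List.foldl_cons, List.map_cons]; exact ih _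

lemma foldl_max_max (l : List Int) (a b : Int) :
    l.foldl max (max a b) = max a (l.foldl max b) := by
  induction l generalizing b with
  | nil => rfl
  | cons c t ih =>
      simp only [List.foldl_cons]
      rw [max_assoc, ih]

-- ===== VERDICT (by name: the statement is the Claim_ definition above) =====
theorem solution_spec : Claim_equal_solution := by
  intro rl ur _ hpre
  obtain ⟨hok1, hok2⟩ := hpre
  unfold Spec_solution solution solution_alt
  have hcongr : (PySem.List.pyRange 1 101 1).foldl
      (fun m i => max m (PySem.List.pyGetD (ur.foldl fillSeg (List.replicate 101 (0 : Int), 1)).1 i 0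
        - PySem.List.pyGetD (rl.foldl fillSeg (List.replicate 101 (0 : Int), 1)).1 i 0)) 0
      = (PySem.List.pyRange 1 101 1).foldl
      (fun m i => max m (speedGo 1 ur i - speedGo 1 rl i)) 0 := by
    apply PySem.List.foldl_congr_mem
    intro m i hi
    have h1 : (1 : Int) ≤ i ∧ i < 101 := PySem.List.mem_pyRange_one.mp hi
    rw [fill_top ur i hok2 h1.1 (by omega), fill_top rl i hok1 h1.1 (by omega)]
  rw [hcongr, foldl_max_map]
  rw [show (PySem.List.pyRange 1 101 1) = 1 :: PySem.List.pyRange 2 101 1 from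
    PySem.List.pyRange_one_cons (by norm_num)]
  simp only [List.map_cons, List.foldl_cons]
  rw [foldl_max_max]
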